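-- pv_equiv track=rewrite | github.com/makimaki1006/kaigo-bi-platform | scripts/opening_question_analysis.py | compute_bigram_transitions
-- ===== SOURCE A (Python) =====
-- from collections import Counter, defaultdict
--
-- def compute_bigram_transitions(
--     patterns: list[list[str]],
-- ) -> dict[str, Counter[str]]:
--     """カテゴリ間の遷移（bigram）を集計する."""
--     transitions: dict[str, Counter[str]] = defaultdict(Counter)
--     for pat in patterns:
--         for i in range(len(pat) - 1):
--             transitions[pat[i]][pat[i + 1]] += 1
--     return dict(transitions)
-- ===== SOURCE B (Python) =====
-- from collections import Counter, defaultdict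
--
-- def compute_bigram_transitions(
--     patterns: list[list[str]],
-- ) -> dict[str, Counter[str]]:
--     """Aggregate all bigrams into one flat Counter, then pivot it into the nested shape."""
--     flat = Counter((a, b) for pat in patterns for a, b in zip(pat, pat[1:]))
--     result: dict[str, Counter[str]] = defaultdict(Counter)
--     for (a, b), c in flat.items():
--         result[a][b] = c
--     return dict(result)
-- ===== Notes on version B (the rewrite author's own statement) =====
-- stated objective: alternative
-- what changed: Instead of incrementing a nested dict-of-Counters in place per bigram, B first aggregates all bigrams of all patterns into one flat Counter of pair tuples and then pivots that flat table into the nested per-first-category Counters in a second pass.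
import Mathlib
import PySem

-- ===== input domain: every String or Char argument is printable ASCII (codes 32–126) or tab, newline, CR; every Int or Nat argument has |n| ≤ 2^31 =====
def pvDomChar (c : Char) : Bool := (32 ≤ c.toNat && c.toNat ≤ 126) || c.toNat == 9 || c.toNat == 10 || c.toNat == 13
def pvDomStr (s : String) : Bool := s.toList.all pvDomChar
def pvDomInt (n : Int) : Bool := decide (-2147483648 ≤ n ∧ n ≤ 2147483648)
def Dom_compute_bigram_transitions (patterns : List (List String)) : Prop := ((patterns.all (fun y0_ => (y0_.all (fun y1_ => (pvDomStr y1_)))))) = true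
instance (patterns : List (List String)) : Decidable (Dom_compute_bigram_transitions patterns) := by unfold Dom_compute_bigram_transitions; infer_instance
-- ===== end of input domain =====

-- B replaces A's in-place nested increments by one flat pair Counter that is then pivoted into the nested shape (alternative decomposition, same cost).

-- ===== PORT A =====
def compute_bigram_transitions (patterns : List (List String)) : List (String × List (String × Int)) :=
  -- transitions = defaultdict(Counter); for pat: for i in range(len(pat)-1): transitions[pat[i]][pat[i+1]] += 1
  let transitions : PySem.Dict String (PySem.Dict String Int) :=
    patterns.foldl
      (fun trans pat =>
        (PySem.List.pyRange 0 (PySem.List.len pat - 1)).foldl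
          (fun trans i =>
            trans.modify (PySem.List.pyGetD pat i "") PySem.Dict.empty
              (fun cnt => cnt.modify (PySem.List.pyGetD pat (i + 1) "") 0 (· + 1)))
          trans)
      PySem.Dict.empty
  transitions.items.map (fun p => (p.1, p.2.items))

-- ===== PORT B =====
def compute_bigram_transitions_alt (patterns : List (List String)) : List (String × List (String × Int)) :=
  -- flat = Counter((a, b) for pat in patterns for a, b in zip(pat, pat[1:]))
  let flat : PySem.Dict (String × String) Int :=
    PySem.Dict.counter (patterns.flatMap (fun pat => pat.zip (PySem.List.slice pat (some 1) none)))
  -- result = defaultdict(Counter); for (a, b), c in flat.items(): result[a][b] = c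
  let result : PySem.Dict String (PySem.Dict String Int) :=
    flat.items.foldl
      (fun res q => res.modify q.1.1 PySem.Dict.empty (fun cnt => cnt.insert q.1.2 q.2))
      PySem.Dict.empty
  result.items.map (fun p => (p.1, p.2.items))

-- ===== PRECONDITION & SPEC =====
def Spec_compute_bigram_transitions (patterns : List (List String)) (out : List (String × List (String × Int))) : Prop := out = compute_bigram_transitions_alt patterns
instance (patterns : List (List String)) (out : List (String × List (String × Int))) : Decidable (Spec_compute_bigram_transitions patterns out) := by unfold Spec_compute_bigram_transitions; infer_instance

-- ===== CLAIM (what is proved, stated in full; the proofs are below) =====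
def Claim_equal_compute_bigram_transitions : Prop := ∀ (patterns : List (List String)), Dom_compute_bigram_transitions patterns → Spec_compute_bigram_transitions patterns (compute_bigram_transitions patterns)

-- ===== LEMMAS AND PROOFS =====

-- fold of per-pattern folds = fold over the flattened stream
theorem pv_foldl_flatMap {α β σ : Type} (l : List α) (zf : α → List β) (g : σ → β → σ) (init : σ) :
    l.foldl (fun t x => (zf x).foldl g t) init = (l.flatMap zf).foldl g init := by
  induction l generalizing init with
  | nil => rfl
  | cons x xs ih => simp [List.flatMap_cons, List.foldl_append, ih]

-- A's indexed inner loop is the fold over zip(pat, pat.tail)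
theorem pv_inner_eq {σ : Type} (pat : List String) (step : σ → String → String → σ) (init : σ) :
    (PySem.List.pyRange 0 (PySem.List.len pat - 1)).foldl
      (fun d i => step d (PySem.List.pyGetD pat i "") (PySem.List.pyGetD pat (i + 1) "")) init
    = (pat.zip pat.tail).foldl (fun d p => step d p.1 p.2) init := by
  cases pat with
  | nil =>
    rw [PySem.List.pyRange_one_eq_nil (by simp [PySem.List.len])]
    rfl
  | cons h t =>
    have hlen : PySem.List.len (h :: t) - 1 = (((h :: t).zip (h :: t).tail).length : Int) := by
      simp [PySem.List.len, List.length_zip]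
    rw [hlen, ← PySem.List.foldl_pyRange_zero_pyGetD' ((h :: t).zip (h :: t).tail) ("", "")
          (fun d p => step d p.1 p.2) init]
    apply PySem.List.foldl_congr_mem
    intro acc i hi
    obtain ⟨h0, h1⟩ := PySem.List.mem_pyRange_one.1 hi
    have hz : ((h :: t).zip (h :: t).tail).length = t.length := by simp [List.length_zip]
    have hit : i.toNat < t.length := by omega
    have hi1 : i.toNat + 1 < (h :: t).length := by simp; omega
    rw [PySem.List.pyGetD_eq_getElem _ _ h0 (by omega : i < (((h::t).zip (h::t).tail).length : Int)),
        PySem.List.pyGetD_eq_getElem (h :: t) _ h0 (by simp; omega),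
        PySem.List.pyGetD_eq_getElem (h :: t) _ (by omega : (0:Int) ≤ i + 1) (by simp; omega)]
    have ht1 : (i + 1).toNat = i.toNat + 1 := by omega
    simp only [List.getElem_zip, List.getElem_tail, ht1]

-- getD of a modify-at-key loop: only the matching elements act, in order
theorem pv_getD_foldl_modify_key {α κ ν : Type} [BEq κ] [LawfulBEq κ]
    (L : List α) (key : α → κ) (d0 : ν) (g : α → ν → ν) (d : PySem.Dict κ ν) (a : κ) :
    (L.foldl (fun d x => d.modify (key x) d0 (g x)) d).getD a d0
      = (L.filter (fun x => key x == a)).foldl (fun v x => g x v) (d.getD a d0) := by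
  induction L generalizing d with
  | nil => rfl
  | cons x l ih =>
    simp only [List.foldl_cons, List.filter_cons]
    by_cases h : key x = a
    · simp [h, ih, PySem.Dict.getD_modify_self]
    · have hb : (key x == a) = false := by simp [h]
      simp [hb, ih, PySem.Dict.getD_modify_of_ne _ d0 _ (Ne.symm h)]

-- first-occurrence dedup commutes with filter
theorem pv_filter_foldl_add {α : Type} [BEq α] [LawfulBEq α] (L : List α) (q : α → Bool) (s : List α) :
    (List.foldl PySem.Set.add s L).filter q = List.foldl PySem.Set.add (s.filter q) (L.filter q) := by
  induction L generalizing s with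
  | nil => rfl
  | cons x l ih =>
    simp only [List.foldl_cons, List.filter_cons]
    by_cases hc : x ∈ s
    · have h1 : PySem.Set.add s x = s := by simp [PySem.Set.add, hc]
      by_cases hq : q x
      · have h2 : PySem.Set.add (s.filter q) x = s.filter q := by
          simp [PySem.Set.add, List.mem_filter, hc, hq]
        simp [hq, h1, h2, ih]
      · simp [hq, h1, ih]
    · have h1 : PySem.Set.add s x = s ++ [x] := by simp [PySem.Set.add, hc]
      by_cases hq : q x
      · have h2 : PySem.Set.add (s.filter q) x = s.filter q ++ [x] := by
          simp [PySem.Set.add, List.mem_filter, hc]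
        simp [hq, h1, h2, ih, List.filter_append]
      · simp [hq, h1, ih, List.filter_append]

theorem pv_ofList_filter {α : Type} [BEq α] [LawfulBEq α] (L : List α) (q : α → Bool) :
    PySem.Set.ofList (L.filter q) = (PySem.Set.ofList L).filter q := by
  have := pv_filter_foldl_add L q []
  simpa [PySem.Set.ofList, PySem.Set.empty] using this.symm

theorem pv_ofList_append_cons_mem {α : Type} [BEq α] [LawfulBEq α] (u w : List α) (v : α)
    (hv : v ∈ u) : PySem.Set.ofList (u ++ v :: w) = PySem.Set.ofList (u ++ w) := by
  rw [PySem.Set.ofList_append, PySem.Set.ofList_append, PySem.Set.update_cons]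
  congr 1
  have : v ∈ PySem.Set.ofList u := (PySem.Set.mem_ofList u v).2 hv
  simp [PySem.Set.add, this]

theorem pv_map_foldl_add {α β : Type} [BEq α] [LawfulBEq α] [BEq β] [LawfulBEq β]
    (f : α → β) (L : List α) : ∀ (s : List α),
    PySem.Set.ofList ((List.foldl PySem.Set.add s L).map f)
      = PySem.Set.ofList (s.map f ++ L.map f) := by
  induction L with
  | nil => intro s; simp
  | cons x l ih =>
    intro s
    simp only [List.foldl_cons, List.map_cons]
    by_cases hc : x ∈ s
    · have h1 : PySem.Set.add s x = s := by simp [PySem.Set.add, hc]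
      rw [h1, ih s, pv_ofList_append_cons_mem _ _ _ (List.mem_map_of_mem hc)]
    · have h1 : PySem.Set.add s x = s ++ [x] := by simp [PySem.Set.add, hc]
      rw [h1, ih (s ++ [x])]
      simp

theorem pv_ofList_map_ofList {α β : Type} [BEq α] [LawfulBEq α] [BEq β] [LawfulBEq β]
    (L : List α) (f : α → β) :
    PySem.Set.ofList ((PySem.Set.ofList L).map f) = PySem.Set.ofList (L.map f) := by
  have := pv_map_foldl_add f L []
  simpa [PySem.Set.ofList, PySem.Set.empty] using this

theorem pv_map_inj_aux {α β : Type} [BEq α] [LawfulBEq α] [BEq β] [LawfulBEq β]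
    (f : α → β) (L : List α) : ∀ (s : List α),
    (∀ x ∈ L, ∀ y ∈ L, f x = f y → x = y) →
    (∀ x ∈ L, ∀ y ∈ s, f y = f x → y = x) →
    List.foldl PySem.Set.add (s.map f) (L.map f) = (List.foldl PySem.Set.add s L).map f := by
  induction L with
  | nil => intro s _ _; rfl
  | cons x l ih =>
    intro s h1 h2
    simp only [List.map_cons, List.foldl_cons]
    have hstep : PySem.Set.add (s.map f) (f x) = (PySem.Set.add s x).map f := by
      by_cases hc : x ∈ s
      · have : f x ∈ s.map f := List.mem_map_of_mem hc
        simp [PySem.Set.add, hc, this]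
      · have hnc : f x ∉ s.map f := by
          intro hm
          obtain ⟨y, hy, hfy⟩ := List.mem_map.1 hm
          exact hc (h2 x (by simp) y hy hfy ▸ hy)
        simp [PySem.Set.add, hc, hnc]
    rw [hstep]
    apply ih (PySem.Set.add s x)
    · intro a ha b hb hab
      exact h1 a (by simp [ha]) b (by simp [hb]) hab
    · intro a ha y hy hfy
      rcases (PySem.Set.mem_add s x y).1 hy with hys | hyx
      · exact h2 a (by simp [ha]) y hys hfy
      · subst hyx
        exact h1 y (by simp) a (by simp [ha]) hfy
    -- careful: h1 y a : f y = f a → y = a; hfy : f y = f a? hfy : f y = f a yes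
theorem pv_ofList_map_inj {α β : Type} [BEq α] [LawfulBEq α] [BEq β] [LawfulBEq β]
    (L : List α) (f : α → β) (hinj : ∀ x ∈ L, ∀ y ∈ L, f x = f y → x = y) :
    PySem.Set.ofList (L.map f) = (PySem.Set.ofList L).map f := by
  have := pv_map_inj_aux f L [] hinj (by simp)
  simpa [PySem.Set.ofList, PySem.Set.empty] using this

-- the two per-key item lists coincide
theorem pv_bridge (L : List (String × String)) (a : String) :
    ((PySem.Set.ofList L).filter (fun p => p.1 == a)).map (fun p => (p.2, (L.count p : Int)))
      = (PySem.Set.ofList ((L.filter (fun p => p.1 == a)).map (fun p => p.2))).map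
          (fun b => (b, (((L.filter (fun p => p.1 == a)).map (fun p => p.2)).count b : Int))) := by
  set F := L.filter (fun p => p.1 == a) with hF
  have hFa : ∀ x ∈ F, x.1 = a := by
    intro x hx
    have := (List.mem_filter.1 hx).2
    simpa using this
  rw [← pv_ofList_filter,
      pv_ofList_map_inj F (fun p => p.2)
        (fun x hx y hy h => Prod.ext (by rw [hFa x hx, hFa y hy]) h),
      List.map_map]
  apply List.map_congr_left
  intro p hp
  have hpF : p ∈ F := (PySem.Set.mem_ofList F p).1 hp
  simp only [Function.comp]
  congr 1
  -- count p L = count p.2 (F.map (·.2))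
  have h1 : List.count p F = List.count p L := by
    apply List.count_filter
    simp [hFa p hpF]
  rw [← h1, List.count_eq_countP, List.count_eq_countP, List.countP_map]
  congr 1
  apply List.countP_congr
  intro x hx
  simp only [Function.comp, beq_iff_eq]
  constructor
  · intro h2; rw [h2]
  · intro h2; exact Prod.ext (by rw [hFa x hx, hFa p hpF]) h2

-- ===== VERDICT (by name: the statement is the Claim_ definition above) =====
theorem compute_bigram_transitions_spec : Claim_equal_compute_bigram_transitions := by
  intro patterns _
  unfold Spec_compute_bigram_transitions compute_bigram_transitions compute_bigram_transitions_alt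
  simp only [PySem.List.slice_from_one]
  have hbody : (fun (trans : PySem.Dict String (PySem.Dict String Int)) pat =>
      (PySem.List.pyRange 0 (PySem.List.len pat - 1)).foldl
        (fun trans i =>
          trans.modify (PySem.List.pyGetD pat i "") PySem.Dict.empty
            (fun cnt => cnt.modify (PySem.List.pyGetD pat (i + 1) "") 0 (· + 1)))
        trans)
      = (fun trans pat => (pat.zip pat.tail).foldl
          (fun d p => d.modify p.1 PySem.Dict.empty (fun cnt => cnt.modify p.2 0 (· + 1))) trans) := by
    funext trans pat
    exact pv_inner_eq pat
      (fun d x y => d.modify x PySem.Dict.empty (fun cnt => cnt.modify y 0 (· + 1))) trans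
  rw [hbody, pv_foldl_flatMap]
  set L := patterns.flatMap (fun pat => pat.zip pat.tail) with hL
  set dA : PySem.Dict String (PySem.Dict String Int) := L.foldl
      (fun d p => d.modify p.1 PySem.Dict.empty (fun cnt => cnt.modify p.2 0 (· + 1)))
      PySem.Dict.empty with hdA
  set dB := (PySem.Dict.counter L).items.foldl
      (fun res q => res.modify q.1.1 PySem.Dict.empty (fun cnt => cnt.insert q.1.2 q.2))
      PySem.Dict.empty with hdB
  have hnA : dA.keys.Nodup := by
    rw [hdA]
    have h := PySem.Dict.nodup_keys_foldl_modify_key L (fun p => p.1)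
      (PySem.Dict.empty : PySem.Dict String Int)
      (fun _ p cnt => cnt.modify p.2 0 (· + 1)) PySem.Dict.empty (by simp)
    exact h
  have hnB : dB.keys.Nodup := by
    rw [hdB]
    have h := PySem.Dict.nodup_keys_foldl_modify_key (PySem.Dict.counter L).items (fun q => q.1.1)
      PySem.Dict.empty (fun _ q cnt => cnt.insert q.1.2 q.2) PySem.Dict.empty (by simp)
    exact h
  have hkA : dA.keys = PySem.Set.ofList (L.map (fun p => p.1)) := by
    have h := PySem.Dict.keys_foldl_modify_key L (fun p => p.1)
      (PySem.Dict.empty : PySem.Dict String Int)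
      (fun _ p cnt => cnt.modify p.2 0 (· + 1)) PySem.Dict.empty
    simpa [PySem.Set.update_nil_left] using h
  have hkB : dB.keys = PySem.Set.ofList (L.map (fun p => p.1)) := by
    have h := PySem.Dict.keys_foldl_modify_key (PySem.Dict.counter L).items (fun q => q.1.1)
      PySem.Dict.empty (fun _ q cnt => cnt.insert q.1.2 q.2) PySem.Dict.empty
    have hmap : (PySem.Dict.counter L).items.map (fun q => q.1.1)
        = (PySem.Set.ofList L).map (fun p => p.1) := by
      rw [PySem.Dict.items_counter, List.map_map]; rfl
    rw [hmap] at h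
    rw [hdB]
    simpa [PySem.Set.update_nil_left, pv_ofList_map_ofList] using h
  have hgA : ∀ a : String, (dA.getD a PySem.Dict.empty).items
      = (PySem.Set.ofList ((L.filter (fun p => p.1 == a)).map (fun p => p.2))).map
          (fun b => (b, (((L.filter (fun p => p.1 == a)).map (fun p => p.2)).count b : Int))) := by
    intro a
    have h := pv_getD_foldl_modify_key L (fun p => p.1)
      (PySem.Dict.empty : PySem.Dict String Int)
      (fun p cnt => cnt.modify p.2 0 (· + 1)) PySem.Dict.empty a
    rw [PySem.Dict.getD_empty] at h
    rw [hdA, h]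
    rw [show (List.filter (fun p => p.1 == a) L).foldl
          (fun v p => v.modify p.2 0 (· + 1)) PySem.Dict.empty
        = PySem.Dict.counter ((L.filter (fun p => p.1 == a)).map (fun p => p.2)) by
      rw [PySem.Dict.counter_eq_foldl, List.foldl_map]]
    exact PySem.Dict.items_counter _
  have hgB : ∀ a : String, (dB.getD a PySem.Dict.empty).items
      = ((PySem.Set.ofList L).filter (fun p => p.1 == a)).map
          (fun p => (p.2, (L.count p : Int))) := by
    intro a
    have h := pv_getD_foldl_modify_key (PySem.Dict.counter L).items (fun q => q.1.1)
      PySem.Dict.empty (fun q cnt => cnt.insert q.1.2 q.2) PySem.Dict.empty a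
    rw [PySem.Dict.getD_empty] at h
    rw [hdB, h, PySem.Dict.items_counter, List.filter_map]
    have h2 : ((fun (q : (String × String) × Int) => q.1.1 == a) ∘ fun k => (k, (List.count k L : Int)))
        = (fun p => p.1 == a) := rfl
    rw [h2, List.foldl_map]
    set K := (PySem.Set.ofList L).filter (fun p => p.1 == a) with hK
    have hKnd : K.Nodup := (PySem.Set.nodup_ofList L).filter _
    have hKa : ∀ x ∈ K, x.1 = a := by
      intro x hx
      have := (List.mem_filter.1 hx).2
      simpa using this
    have hnd2 : (K.map (fun p => p.2)).Nodup :=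
      List.Nodup.map_on (fun x hx y hy h => Prod.ext (by rw [hKa x hx, hKa y hy]) h) hKnd
    have h3 := PySem.Dict.items_foldl_insert_fresh K (fun k => k.2)
      (fun k => (List.count k L : Int)) PySem.Dict.empty
      (fun q _ => PySem.Dict.contains_empty _) hnd2
    simpa using h3
  rw [PySem.Dict.items_eq_map_keys dA hnA PySem.Dict.empty,
      PySem.Dict.items_eq_map_keys dB hnB PySem.Dict.empty,
      List.map_map, List.map_map, hkA, hkB]
  apply List.map_congr_left
  intro a _
  simp only [Function.comp]
  rw [hgA a, hgB a, pv_bridge]
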